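-- pv_equiv track=rewrite | github.com/PermutaTriangle/Tilings | grids/misc.py | compress_dict_rows
-- ===== SOURCE A (Python) =====
-- def compress_dict_rows(blocks):
--     new_blocks = dict()
--
--     points_by_j_coord = sorted(blocks.keys(), key=lambda x: x[1])
--
--     new_j = 0
--     for ind, (i, j) in enumerate(points_by_j_coord):
--         if ind != 0 and points_by_j_coord[ind][1] != points_by_j_coord[ind - 1][1]:
--             new_j += 1
--         new_blocks[(i, new_j)] = blocks[(i, j)]
--     return new_blocks
-- ===== SOURCE B (Python) =====
-- def compress_dict_rows(blocks):
--     js = sorted({k[1] for k in blocks})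
--     return {
--         (k[0], r): v
--         for r, j in enumerate(js)
--         for k, v in blocks.items()
--         if k[1] == j
--     }
-- ===== Notes on version B (the rewrite author's own statement) =====
-- stated objective: alternative
-- what changed: B first computes the sorted distinct row coordinates and then, for each rank in order, emits the matching items by scanning the original dict, instead of stably sorting all keys and threading an incrementing row counter driven by index comparisons with the previous sorted key.
import Mathlib
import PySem

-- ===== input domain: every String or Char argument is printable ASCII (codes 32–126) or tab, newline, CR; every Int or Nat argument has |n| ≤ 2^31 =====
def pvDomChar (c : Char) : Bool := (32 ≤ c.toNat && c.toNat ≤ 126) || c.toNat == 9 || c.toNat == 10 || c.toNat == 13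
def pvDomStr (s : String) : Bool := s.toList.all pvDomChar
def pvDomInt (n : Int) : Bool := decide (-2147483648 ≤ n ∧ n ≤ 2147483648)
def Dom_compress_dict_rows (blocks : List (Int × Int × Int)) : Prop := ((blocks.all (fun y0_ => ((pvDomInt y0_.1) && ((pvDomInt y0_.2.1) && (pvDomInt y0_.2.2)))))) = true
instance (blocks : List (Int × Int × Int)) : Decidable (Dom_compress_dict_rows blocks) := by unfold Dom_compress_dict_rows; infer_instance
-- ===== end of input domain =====

-- B replaces A's stable sort of all keys + threaded row counter by: sorted distinct row
-- coordinates first, then one scan of the original dict per rank (objective: alternative).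
-- The dict argument is a List (Int × Int × Int): entry (i, j, v) stands for blocks[(i, j)] = v.

-- ===== PORT A =====
-- loop body of A's 'for ind, (i, j) in enumerate(points_by_j_coord)'; the pyGetD default
-- (0, 0) is never used: the indices ind and ind-1 (read only under ind ≠ 0) are in range.
def pvBodyA (bd : PySem.Dict (Int × Int) Int) (s : List (Int × Int))
    (st : PySem.Dict (Int × Int) Int × Int) (p : Int × (Int × Int)) :
    PySem.Dict (Int × Int) Int × Int :=
  let nj : Int :=
    if p.1 ≠ 0 ∧ (PySem.List.pyGetD s p.1 (0, 0)).2 ≠ (PySem.List.pyGetD s (p.1 - 1) (0, 0)).2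
    then st.2 + 1 else st.2
  -- blocks[(i, j)]: the key is present (it comes from blocks.keys()), so getD is exact
  (st.1.insert (p.2.1, nj) (bd.getD p.2 0), nj)

def compress_dict_rows (blocks : List (Int × Int × Int)) : List (Int × Int × Int) :=
  let bd : PySem.Dict (Int × Int) Int :=
    PySem.Dict.mk (blocks.map (fun b => ((b.1, b.2.1), b.2.2)))
  let s := PySem.List.sorted bd.keys (fun x => x.2)
  let res := (PySem.List.enumerate s).foldl (pvBodyA bd s) (PySem.Dict.empty, 0)
  res.1.items.map (fun q => (q.1.1, q.1.2, q.2))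

-- ===== PORT B =====
-- Source B: js = sorted({k[1] for k in blocks}); then one dict comprehension over ranks × items.
-- Under Pre_ every key (k[0], r) the comprehension produces is distinct, so the resulting
-- dict is the plain concatenation of the produced pairs, transcribed as flatMap/filterMap.
def compress_dict_rows_alt (blocks : List (Int × Int × Int)) : List (Int × Int × Int) :=
  let js := PySem.List.sorted (PySem.Set.ofList (blocks.map (fun k => k.2.1))) (fun x => x)
  (PySem.List.enumerate js).flatMap (fun rj =>
    blocks.filterMap (fun kv =>
      if kv.2.1 = rj.2 then some (kv.1, rj.1, kv.2.2) else none))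

-- ===== PRECONDITION & SPEC =====
-- Pre_ excludes only association lists with a duplicated key (i, j): those represent no
-- Python dict, so every input the Python programs can actually receive satisfies Pre_.
def Pre_compress_dict_rows (blocks : List (Int × Int × Int)) : Prop :=
  (blocks.map (fun b => (b.1, b.2.1))).Nodup
instance (blocks : List (Int × Int × Int)) : Decidable (Pre_compress_dict_rows blocks) := by
  unfold Pre_compress_dict_rows; infer_instance

def pvWitness_compress_dict_rows : (List (Int × Int × Int)) := [(0, 1, 5), (2, 0, 7), (0, 0, 3)]

def Spec_compress_dict_rows (blocks : List (Int × Int × Int)) (out : List (Int × Int × Int)) : Prop := out = compress_dict_rows_alt blocks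
instance (blocks : List (Int × Int × Int)) (out : List (Int × Int × Int)) : Decidable (Spec_compress_dict_rows blocks out) := by unfold Spec_compress_dict_rows; infer_instance

-- ===== CLAIM (what is proved, stated in full; the proofs are below) =====
def Claim_equal_compress_dict_rows : Prop := ∀ (blocks : List (Int × Int × Int)), Dom_compress_dict_rows blocks → Pre_compress_dict_rows blocks → Spec_compress_dict_rows blocks (compress_dict_rows blocks)

-- ===== LEMMAS AND PROOFS =====

def pvGo (bd : PySem.Dict (Int × Int) Int) :
    Option Int → Int → PySem.Dict (Int × Int) Int → List (Int × Int) →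
    PySem.Dict (Int × Int) Int × Int
  | _, c, d, [] => (d, c)
  | prev, c, d, k :: ks =>
      let bump : Bool := match prev with | some jp => k.2 != jp | none => false
      let nj : Int := if bump then c + 1 else c
      pvGo bd (some k.2) nj (d.insert (k.1, nj) (bd.getD k 0)) ks

theorem pvGo_cons (bd : PySem.Dict (Int × Int) Int) (prev : Option Int) (c : Int)
    (d : PySem.Dict (Int × Int) Int) (k : Int × Int) (ks : List (Int × Int)) :
    pvGo bd prev c d (k :: ks)
      = pvGo bd (some k.2)
          (if (match prev with | some jp => (k.2 != jp) | none => false : Bool) then c + 1 else c)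
          (d.insert (k.1, (if (match prev with | some jp => (k.2 != jp) | none => false : Bool) then c + 1 else c)) (bd.getD k 0)) ks := rfl

theorem foldl_body_eq_go (bd : PySem.Dict (Int × Int) Int) :
    ∀ (suf pre : List (Int × Int)) (d : PySem.Dict (Int × Int) Int) (c : Int),
      (PySem.List.enumerate suf (pre.length : Int)).foldl (pvBodyA bd (pre ++ suf)) (d, c)
        = pvGo bd (pre.getLast?.map (·.2)) c d suf := by
  intro suf
  induction suf with
  | nil => intro pre d c; simp [PySem.List.enumerate, pvGo]
  | cons k ks ih =>
    intro pre d c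
    rw [PySem.List.enumerate_cons, List.foldl_cons]
    have hget : PySem.List.pyGetD (pre ++ k :: ks) (pre.length : Int) (0, 0) = k := by
      rw [PySem.List.pyGetD_natCast]
      simp [List.getD]
    have hstep : pvBodyA bd (pre ++ k :: ks) (d, c) ((pre.length : Int), k)
        = (d.insert (k.1, (if (match pre.getLast?.map (·.2) with | some jp => k.2 != jp | none => false) then c + 1 else c)) (bd.getD k 0),
           (if (match pre.getLast?.map (·.2) with | some jp => k.2 != jp | none => false) then c + 1 else c)) := by
      cases hpre : pre with
      | nil => simp [pvBodyA]
      | cons q pre' =>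
        have hne : pre.getLast? = some (pre.getLast (by simp [hpre])) := by
          subst hpre; exact List.getLast?_eq_some_getLast (by simp)
        have hprev : PySem.List.pyGetD (pre ++ k :: ks) ((pre.length : Int) - 1) (0, 0)
            = pre.getLast (by simp [hpre]) := by
          subst hpre
          have hcast : (((q :: pre').length : Int) - 1) = (((q :: pre').length - 1 : Nat) : Int) := by
            simp
          rw [hcast, PySem.List.pyGetD_natCast]
          have hlt : (q :: pre').length - 1 < (q :: pre').length := by simp
          rw [List.getD_eq_getElem?_getD, List.getElem?_append_left hlt, List.getElem?_eq_getElem hlt]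
          simp [List.getLast_eq_getElem]
        subst hpre
        simp only [pvBodyA, hget, hprev, hne, Option.map_some]
        have hcond : (((q :: pre').length : Nat) : Int) ≠ 0 := by simp; omega
        rcases eq_or_ne k.2 ((q :: pre').getLast (by simp)).2 with h | h
        · simp [h]
        · simp [h]
          exact ⟨by rw [if_neg (by omega : ¬ ((pre'.length : Int) + 1 = 0))], by omega⟩
    rw [hstep]
    have hlen1 : (pre.length : Int) + 1 = (((pre ++ [k]).length : Nat) : Int) := by simp
    have hs : pre ++ k :: ks = (pre ++ [k]) ++ ks := by simp
    rw [hlen1, hs, ih (pre ++ [k])]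
    cases pre with
    | nil => simp [pvGo]
    | cons q pre' =>
      have h1 : ((q :: pre') ++ [k]).getLast? = some k := List.getLast?_concat
      have h2 : (q :: pre').getLast? = some ((q :: pre').getLast (by simp)) := List.getLast?_eq_some_getLast (by simp)
      rw [h1, h2]
      simp only [pvGo, Option.map_some]


theorem filter_insertBy (j : Int) (x : Int × Int) :
    ∀ (l : List (Int × Int)), l.Pairwise (fun a b => a.2 ≤ b.2) →
    (PySem.List.insertBy (fun a b => decide (a.2 < b.2)) x l).filter (fun k => k.2 = j)
      = if x.2 = j then l.filter (fun k => k.2 = j) ++ [x] else l.filter (fun k => k.2 = j) := by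
  intro l
  induction l with
  | nil =>
    intro _
    by_cases h : x.2 = j <;> simp [PySem.List.insertBy, h]
  | cons y ys ih =>
    intro hp
    rw [List.pairwise_cons] at hp
    by_cases hb : x.2 < y.2
    · have hstep : PySem.List.insertBy (fun a b => decide (a.2 < b.2)) x (y :: ys) = x :: y :: ys := by
        simp [PySem.List.insertBy, hb]
      rw [hstep]
      by_cases h : x.2 = j
      · have hnil : (y :: ys).filter (fun k => decide (k.2 = j)) = [] := by
          rw [List.filter_eq_nil_iff]
          intro a ha
          rcases List.mem_cons.mp ha with rfl | ha'
          · simp; omega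
          · have := hp.1 a ha'; simp; omega
        simp [h, hnil]
      · simp [h]
    · have hstep : PySem.List.insertBy (fun a b => decide (a.2 < b.2)) x (y :: ys)
          = y :: PySem.List.insertBy (fun a b => decide (a.2 < b.2)) x ys := by
        simp [PySem.List.insertBy, hb]
      rw [hstep]
      by_cases h : x.2 = j <;> by_cases hy : y.2 = j <;>
        simp [h, hy, ih hp.2]

theorem filter_sorted_eq (xs : List (Int × Int)) (j : Int) :
    (PySem.List.sorted xs (fun x => x.2)).filter (fun k => k.2 = j)
      = xs.filter (fun k => k.2 = j) := by
  induction xs using List.reverseRecOn with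
  | nil => simp [PySem.List.sorted]
  | append_singleton xs x ih =>
    have hsa : PySem.List.sorted (xs ++ [x]) (fun x => x.2)
        = PySem.List.insertBy (fun a b => decide (a.2 < b.2)) x
            (PySem.List.sorted xs (fun x => x.2)) := by
      rw [PySem.List.sorted_eq_foldl_insertBy, List.foldl_append,
        ← PySem.List.sorted_eq_foldl_insertBy]
      rfl
    rw [hsa, filter_insertBy j x _ (PySem.List.sorted_pairwise xs (fun x => x.2))]
    by_cases h : x.2 = j <;> simp [h, ih, List.filter_append]


theorem filter_split_min (j0 : Int) :
    ∀ (s : List (Int × Int)), s.Pairwise (fun a b => a.2 ≤ b.2) → (∀ y ∈ s, j0 ≤ y.2) →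
      s.filter (fun k => k.2 = j0) ++ s.filter (fun k => ¬ k.2 = j0) = s := by
  intro s
  induction s with
  | nil => simp
  | cons x t ih =>
    intro hp hlb
    rw [List.pairwise_cons] at hp
    by_cases h : x.2 = j0
    · rw [List.filter_cons_of_pos (by simp [h]), List.filter_cons_of_neg (by simp [h]),
        List.cons_append, ih hp.2 (fun y hy => hlb y (List.mem_cons_of_mem _ hy))]
    · have hnil : (x :: t).filter (fun k => decide (k.2 = j0)) = [] := by
        rw [List.filter_eq_nil_iff]
        intro a ha
        rcases List.mem_cons.mp ha with rfl | ha'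
        · simp [h]
        · have hx : j0 < x.2 := lt_of_le_of_ne (hlb x (by simp)) (fun e => h e.symm)
          have := hp.1 a ha'; simp; omega
      rw [hnil, List.nil_append, List.filter_eq_self.mpr]
      intro a ha
      rcases List.mem_cons.mp ha with rfl | ha'
      · simp [h]
      · have hx : j0 < x.2 := lt_of_le_of_ne (hlb x (by simp)) (fun e => h e.symm)
        have := hp.1 a ha'; simp; omega

theorem flatMap_filter_eq (jl : List Int) :
    ∀ (s : List (Int × Int)), s.Pairwise (fun a b => a.2 ≤ b.2) →
      jl.Pairwise (· < ·) → (∀ j, j ∈ jl ↔ j ∈ s.map (·.2)) →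
      jl.flatMap (fun j => s.filter (fun k => k.2 = j)) = s := by
  induction jl with
  | nil =>
    intro s _ _ hmem
    rcases s with _ | ⟨x, t⟩
    · simp
    · exact absurd ((hmem x.2).mpr (by simp)) (by simp)
  | cons j0 jt ih =>
    intro s hs hinc hmem
    rw [List.pairwise_cons] at hinc
    have hlb : ∀ y ∈ s, j0 ≤ y.2 := by
      intro y hy
      have : y.2 ∈ j0 :: jt := (hmem y.2).mpr (List.mem_map_of_mem hy)
      rcases List.mem_cons.mp this with e | hmemt
      · omega
      · exact le_of_lt (hinc.1 _ hmemt)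
    have htail : ∀ j ∈ jt, s.filter (fun k => decide (k.2 = j))
        = (s.filter (fun k => ¬ k.2 = j0)).filter (fun k => decide (k.2 = j)) := by
      intro j hj
      have hne : j ≠ j0 := by have := hinc.1 _ hj; omega
      rw [List.filter_filter]
      apply List.filter_congr
      intro a _
      by_cases ha : a.2 = j <;> simp [ha, hne]
    have hih : jt.flatMap (fun j => (s.filter (fun k => ¬ k.2 = j0)).filter (fun k => k.2 = j))
        = s.filter (fun k => ¬ k.2 = j0) := by
      apply ih
      · exact List.Pairwise.sublist List.filter_sublist hs
      · exact hinc.2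
      · intro j
        constructor
        · intro hj
          have hjs : j ∈ s.map (·.2) := (hmem j).mp (List.mem_cons_of_mem _ hj)
          rcases List.mem_map.mp hjs with ⟨a, ha, rfl⟩
          refine List.mem_map.mpr ⟨a, List.mem_filter.mpr ⟨ha, ?_⟩, rfl⟩
          have := hinc.1 _ hj; simp; omega
        · intro hj
          rcases List.mem_map.mp hj with ⟨a, ha, rfl⟩
          rcases List.mem_filter.mp ha with ⟨has, hane⟩
          have : a.2 ∈ j0 :: jt := (hmem a.2).mpr (List.mem_map_of_mem has)
          rcases List.mem_cons.mp this with e | hmemt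
          · exact absurd e (by simpa using hane)
          · exact hmemt
    rw [List.flatMap_cons, List.flatMap_congr htail, hih]
    exact filter_split_min j0 s hs hlb

theorem go_run (bd : PySem.Dict (Int × Int) Int) (j : Int) :
    ∀ (l : List (Int × Int)), (∀ k ∈ l, k.2 = j) →
      ∀ (c : Int) (d : PySem.Dict (Int × Int) Int) (rest : List (Int × Int)),
      pvGo bd (some j) c d (l ++ rest)
        = pvGo bd (some j) c (l.foldl (fun d k => d.insert (k.1, c) (bd.getD k 0)) d) rest := by
  intro l
  induction l with
  | nil => intro _ c d rest; simp
  | cons k t ih =>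
    intro hl c d rest
    have hk : k.2 = j := hl k (by simp)
    rw [List.cons_append]
    show pvGo bd (some k.2) (if (k.2 != j) then c + 1 else c)
        (d.insert (k.1, (if (k.2 != j) then c + 1 else c)) (bd.getD k 0)) (t ++ rest) = _
    rw [hk]
    simp only [bne_self_eq_false, List.foldl_cons]
    exact ih (fun a ha => hl a (by simp [ha])) c _ rest

theorem go_buckets (bd : PySem.Dict (Int × Int) Int) (keys : List (Int × Int))
    (hkeys : keys.Nodup) :
    ∀ (jl : List Int) (prev : Option Int) (c : Int) (d : PySem.Dict (Int × Int) Int),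
      jl.Pairwise (· < ·) →
      (∀ j ∈ jl, keys.filter (fun k => k.2 = j) ≠ []) →
      (∀ j ∈ jl, ∀ jp, prev = some jp → jp < j) →
      (∀ q ∈ d.keys, q.2 < (match prev with | some _ => c + 1 | none => c)) →
      (pvGo bd prev c d (jl.flatMap (fun j => keys.filter (fun k => k.2 = j)))).1.items
        = d.items ++ (PySem.List.enumerate jl (match prev with | some _ => c + 1 | none => c)).flatMap
            (fun rj => (keys.filter (fun k => k.2 = rj.2)).map (fun k => ((k.1, rj.1), bd.getD k 0))) := by
  intro jl
  induction jl with
  | nil => intro prev c d _ _ _ _; simp [pvGo, PySem.List.enumerate]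
  | cons j jt ih =>
    intro prev c d hinc hne hprev hd
    rw [List.pairwise_cons] at hinc
    revert hprev hd
    obtain ⟨c0, hc0⟩ : ∃ c0 : Int, (match prev with | some _ => c + 1 | none => c) = c0 := by
      rcases prev with _ | jp
      · exact ⟨c, rfl⟩
      · exact ⟨c + 1, rfl⟩
    intro hprev hd
    rw [hc0] at hd ⊢
    obtain ⟨h, tB, hB⟩ : ∃ h tB, keys.filter (fun k => k.2 = j) = h :: tB := by
      rcases e : keys.filter (fun k => k.2 = j) with _ | ⟨h, tB⟩
      · exact absurd e (hne j (by simp))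
      · exact ⟨h, tB, e⟩
    have hBmem : ∀ k ∈ keys.filter (fun k => decide (k.2 = j)), k.2 = j := by
      intro k hk; simpa using (List.mem_filter.mp hk).2
    have hh : h.2 = j := hBmem h (by rw [hB]; simp)
    -- freshness of the keys inserted for this bucket
    have hfresh : ∀ a ∈ keys.filter (fun k => decide (k.2 = j)), d.contains (a.1, c0) = false := by
      intro a _
      cases e : d.contains (a.1, c0) with
      | false => rfl
      | true =>
        have hmem := (PySem.Dict.contains_iff_mem_keys _ _).mp e
        have := hd _ hmem
        simp at this
    have hBnodup : (keys.filter (fun k => decide (k.2 = j))).Nodup := hkeys.filter _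
    have hmapnodup : ((keys.filter (fun k => decide (k.2 = j))).map
        (fun a => ((a.1 : Int), c0))).Nodup := by
      refine List.Nodup.map_on ?_ hBnodup
      intro x hx y hy hxy
      have hx2 : x.2 = j := hBmem x hx
      have hy2 : y.2 = j := hBmem y hy
      have : x.1 = y.1 := by simpa using hxy
      exact Prod.ext this (hx2.trans hy2.symm)
    have hitems1 := PySem.Dict.items_foldl_insert_fresh
      (keys.filter (fun k => decide (k.2 = j))) (fun a => ((a.1 : Int), c0))
      (fun a => bd.getD a 0) d hfresh hmapnodup
    -- run the machine over the bucket
    have hgo : pvGo bd prev c d (h :: (tB ++ jt.flatMap (fun j => keys.filter (fun k => k.2 = j))))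
        = pvGo bd (some j) c0 (d.insert (h.1, c0) (bd.getD h 0))
            (tB ++ jt.flatMap (fun j => keys.filter (fun k => k.2 = j))) := by
      rw [pvGo_cons, hh]
      rcases prev with _ | jp
      · show pvGo bd (some j) c (d.insert (h.1, c) (bd.getD h 0)) _ = _
        exact congrArg (fun x => pvGo bd (some j) x (d.insert (h.1, x) (bd.getD h 0))
          (tB ++ jt.flatMap (fun j => keys.filter (fun k => k.2 = j)))) hc0
      · have hpj : jp < j := hprev j (by simp) jp rfl
        have hne' : (j != jp) = true := by simp; omega
        rw [if_pos hne']
        exact congrArg (fun x => pvGo bd (some j) x (d.insert (h.1, x) (bd.getD h 0))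
          (tB ++ jt.flatMap (fun j => keys.filter (fun k => k.2 = j)))) hc0
    rw [List.flatMap_cons, hB, List.cons_append, hgo]
    rw [go_run bd j tB (fun a ha => hBmem a (by rw [hB]; simp [ha])) c0 _ _]
    have hfold : tB.foldl (fun d k => d.insert (k.1, c0) (bd.getD k 0)) (d.insert (h.1, c0) (bd.getD h 0))
        = (keys.filter (fun k => decide (k.2 = j))).foldl (fun d k => d.insert (k.1, c0) (bd.getD k 0)) d := by
      rw [hB]; rfl
    rw [hfold]
    set d1 := (keys.filter (fun k => decide (k.2 = j))).foldl
      (fun d k => d.insert (k.1, c0) (bd.getD k 0)) d with hd1def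
    have hitems1' : d1.items = d.items ++ (keys.filter (fun k => decide (k.2 = j))).map
        (fun a => ((a.1, c0), bd.getD a 0)) := hitems1
    have hd1 : ∀ q ∈ d1.keys, q.2 < c0 + 1 := by
      have hkeys1 : d1.keys = d.keys ++ (keys.filter (fun k => decide (k.2 = j))).map
          (fun a => ((a.1 : Int), c0)) := by
        simp only [PySem.Dict.keys, hitems1', List.map_append, List.map_map]
        rfl
      intro q hq
      rw [hkeys1] at hq
      rcases List.mem_append.mp hq with h1 | h2
      · have := hd q h1; omega
      · rcases List.mem_map.mp h2 with ⟨a, _, rfl⟩; simp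
    have hih := ih (some j) c0 d1 hinc.2 (fun j' hj' => hne j' (by simp [hj']))
      (fun j' hj' jp e => by cases e; exact hinc.1 _ hj') hd1
    rw [hih, hitems1']
    rw [PySem.List.enumerate_cons, List.flatMap_cons, List.append_assoc]

theorem bucket_map_eq (bd : PySem.Dict (Int × Int) Int) (r j : Int) :
    ∀ (blocks : List (Int × Int × Int)), (∀ b ∈ blocks, bd.getD (b.1, b.2.1) 0 = b.2.2) →
    ((blocks.map (fun b => (b.1, b.2.1))).filter (fun k => k.2 = j)).map
        (fun k => (k.1, r, bd.getD k 0))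
      = blocks.filterMap (fun kv => if kv.2.1 = j then some (kv.1, r, kv.2.2) else none) := by
  intro blocks
  induction blocks with
  | nil => intro _; rfl
  | cons b t ih =>
    intro hget
    have hb : bd.getD (b.1, b.2.1) 0 = b.2.2 := hget b (by simp)
    by_cases h : b.2.1 = j
    · simp [h, ih (fun a ha => hget a (by simp [ha]))]
      exact h ▸ hb
    · simp [h, ih (fun a ha => hget a (by simp [ha]))]

-- ===== VERDICT (by name: the statement is the Claim_ definition above) =====
theorem compress_dict_rows_spec : Claim_equal_compress_dict_rows := by
  unfold Claim_equal_compress_dict_rows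
  intro blocks _ hpre
  unfold Spec_compress_dict_rows
  unfold Pre_compress_dict_rows at hpre
  simp only [compress_dict_rows, compress_dict_rows_alt]
  have hbk : (PySem.Dict.mk (blocks.map (fun b => ((b.1, b.2.1), b.2.2))) :
      PySem.Dict (Int × Int) Int).keys = blocks.map (fun b => (b.1, b.2.1)) := by
    simp only [PySem.Dict.keys, List.map_map]
    rfl
  rw [hbk]
  set bd : PySem.Dict (Int × Int) Int :=
    PySem.Dict.mk (blocks.map (fun b => ((b.1, b.2.1), b.2.2))) with hbd
  set K := blocks.map (fun b => ((b.1 : Int), (b.2.1 : Int))) with hKdef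
  set s := PySem.List.sorted K (fun x => x.2) with hs
  set js := PySem.List.sorted (PySem.Set.ofList (blocks.map (fun k => k.2.1))) (fun x => x) with hjs
  have hKnodup : K.Nodup := hpre
  have hbknodup : bd.keys.Nodup := by rw [hbk]; exact hKnodup
  have hA : (PySem.List.enumerate s).foldl (pvBodyA bd s) (PySem.Dict.empty, 0)
      = pvGo bd none 0 PySem.Dict.empty s := by
    have h := foldl_body_eq_go bd s [] PySem.Dict.empty 0
    simpa using h
  rw [hA]
  have hjsinc : js.Pairwise (· < ·) := PySem.List.sorted_ofList_pairwise_lt _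
  have hsperm : s.Perm K := PySem.List.sorted_perm K (fun x => x.2) false
  have hmapK : blocks.map (fun k => k.2.1) = K.map (·.2) := by rw [hKdef, List.map_map]; rfl
  have hmemjs : ∀ j : Int, j ∈ js ↔ j ∈ s.map (·.2) := by
    intro j
    rw [hjs, PySem.List.mem_sorted, PySem.Set.mem_ofList, hmapK]
    exact Iff.symm ((hsperm.map (·.2)).mem_iff)
  have hspair : s.Pairwise (fun a b => a.2 ≤ b.2) := PySem.List.sorted_pairwise _ _
  have hdecomp : js.flatMap (fun j => K.filter (fun k => k.2 = j)) = s := by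
    have h1 : js.flatMap (fun j => s.filter (fun k => k.2 = j)) = s :=
      flatMap_filter_eq js s hspair hjsinc hmemjs
    rw [← h1]
    apply List.flatMap_congr
    intro j _
    rw [hs, filter_sorted_eq]
  have hbne : ∀ j ∈ js, K.filter (fun k => k.2 = j) ≠ [] := by
    intro j hj
    have hjK : j ∈ K.map (·.2) := ((hsperm.map (·.2)).mem_iff).mp ((hmemjs j).mp hj)
    rcases List.mem_map.mp hjK with ⟨a, haK, ha2⟩
    intro hnil
    have : a ∈ K.filter (fun k => decide (k.2 = j)) := List.mem_filter.mpr ⟨haK, by simp [ha2]⟩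
    rw [hnil] at this
    exact absurd this (List.not_mem_nil)
  have hgob := go_buckets bd K hKnodup js none 0 PySem.Dict.empty hjsinc hbne
    (by intro _ _ _ h; cases h) (by simp)
  rw [← hdecomp, hgob]
  have hemp : (PySem.Dict.empty : PySem.Dict (Int × Int) Int).items = [] := rfl
  rw [hemp, List.nil_append, List.map_flatMap]
  apply List.flatMap_congr
  intro rj _
  rw [List.map_map]
  have hget : ∀ b ∈ blocks, bd.getD (b.1, b.2.1) 0 = b.2.2 := by
    intro b hb
    exact PySem.Dict.getD_of_mem_items bd (List.mem_map_of_mem hb) hbknodup 0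
  exact bucket_map_eq bd rj.1 rj.2 blocks hget
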